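-- pv_equiv track=rewrite | github.com/LLKone/code | present/present.py | sBoxLayer
-- ===== SOURCE A (Python) =====
-- sBox = [12,5,6,11,9,0,10,13,3,14,15,8,4,7,1,2]
--
-- def sBoxLayer(state):
-- 	string_state = bin(state)[2:].zfill(64)
-- 	newstring = ""
-- 	for i in range(0, len(string_state),4):
-- 		now_str = string_state[i:i+4]
-- 		c = int(now_str,2)
-- 		newstring += bin(sBox[c])[2:].zfill(4)
-- 	newstate = int(newstring,2)
-- 	return newstate
-- ===== SOURCE B (Python) =====
-- sBox = [12,5,6,11,9,0,10,13,3,14,15,8,4,7,1,2]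
--
-- def sBoxLayer(state):
--     # keep the state as an integer: substitute each 4-bit nibble through sBox in place
--     nibbles = max(16, (state.bit_length() + 3) // 4)
--     result = 0
--     for k in range(nibbles):
--         shift = 4 * k
--         result |= sBox[(state >> shift) & 0xF] << shift
--     return result
-- ===== Notes on version B (the rewrite author's own statement) =====
-- stated objective: alternative
-- what changed: B keeps the state as an integer and substitutes each 4-bit nibble via shift/mask/or arithmetic, instead of A's round-trip through a 64-character binary string with slicing, re-parsing and string concatenation.
-- intended difference: On negative states whose magnitude has bit length = 2 mod 4, bin()'s '-0b' prefix leaks a '0b..' chunk that A's int(chunk,2) accidentally accepts, so A returns a garbage substitution of the mangled digit string (A(-2)=14757395258967641286); B applies the sbox to the two's-complement nibbles (B(-2)=2459565876494606881), the intended arithmetic meaning. — e.g. on sBoxLayer(-2): A returns 14757395258967641286, B returns 2459565876494606881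
import Mathlib
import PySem

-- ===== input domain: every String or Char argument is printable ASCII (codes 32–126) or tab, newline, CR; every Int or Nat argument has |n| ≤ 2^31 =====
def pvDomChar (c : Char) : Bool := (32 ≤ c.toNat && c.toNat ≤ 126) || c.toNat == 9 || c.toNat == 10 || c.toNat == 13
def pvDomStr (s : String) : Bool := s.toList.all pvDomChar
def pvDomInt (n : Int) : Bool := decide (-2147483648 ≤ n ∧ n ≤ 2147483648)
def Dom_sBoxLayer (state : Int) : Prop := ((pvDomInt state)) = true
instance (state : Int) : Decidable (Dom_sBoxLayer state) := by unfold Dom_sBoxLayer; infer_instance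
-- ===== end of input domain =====

-- B replaces A's round trip through a 64-character binary string (bin/zfill/slice/int) by
-- integer shift/mask/or arithmetic on the state itself (objective: alternative, same cost).

-- ===== PORT A =====
def sBox : List Int := [12, 5, 6, 11, 9, 0, 10, 13, 3, 14, 15, 8, 4, 7, 1, 2]

-- hand port of int(s, 2) (PySem.Int.ofCharsBase? computes the same values here, but its digit
-- fold is private to the prelude, so the proofs use this explicit parser).  Exact for every
-- string this function can feed it: nonempty strings over '0'/'1', optionally with a '0b'
-- prefix (pad zero + the 'b' of a negative state's bin()); any other character — in particular
-- a 'b' elsewhere in the chunk — makes Python's int() raise ValueError, modelled as none.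
def goBin (acc : Nat) : List Char → Option Nat
  | [] => some acc
  | c :: cs => if c = '0' then goBin (2 * acc) cs else if c = '1' then goBin (2 * acc + 1) cs else none

def parseBin2 : List Char → Option Nat
  | [] => none
  | '0' :: 'b' :: rest => if rest = [] then none else goBin 0 rest
  | cs => goBin 0 cs

def sBoxLayer (state : Int) : Int :=
  -- string_state = bin(state)[2:].zfill(64)   (strings as List Char via the PySem Chars bridge)
  let string_state : List Char :=
    PySem.Chars.zfill (PySem.Chars.slice (PySem.Int.pyBin state).toList (some 2) none) 64
  -- newstring accumulated over for i in range(0, len(string_state), 4); none = a raised ValueError/IndexError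
  let newstring : Option (List Char) :=
    (PySem.List.pyRange 0 (string_state.length : Int) 4).foldl
      (fun acc i =>
        acc.bind fun ns =>
          let now_str := PySem.List.slice string_state (some i) (some (i + 4))
          (parseBin2 now_str).bind fun c =>
            (PySem.List.pyGet? sBox (c : Int)).map fun v =>
              ns ++ PySem.Chars.zfill (PySem.Chars.slice (PySem.Int.pyBin v).toList (some 2) none) 4)
      (some [])
  match newstring.bind parseBin2 with
  | some v => (v : Int)
  | none => 0   -- unreachable inside Pre_ (the ValueError paths are excluded by Pre_)

-- ===== PORT B =====
def sBoxLayer_alt (state : Int) : Int :=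
  let nibbles : Nat := max 16 ((PySem.Int.bitLength state + 3) / 4)
  (List.range nibbles).foldl
    (fun result k =>
      let shift : Nat := 4 * k
      -- sBox[(state >> shift) & 0xF]: the index is (state >> shift) & 15 ∈ [0, 16), so the
      -- list access never fails; pyGetD's default is unreachable
      PySem.Int.bor result
        (PySem.List.pyGetD sBox (PySem.Int.band (state >>> shift) 15) 0 <<< shift))
    0

-- ===== PRECONDITION & SPEC =====
-- Pre_ excludes exactly the inputs where A raises ValueError: for a negative state bin()'s
-- '-0b' prefix leaves a stray 'b' inside the sliced digit string, and int(chunk, 2) fails on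
-- the chunk containing it unless that chunk happens to be of the accepted form '0bxy' —
-- which happens exactly when the magnitude's bit length is ≡ 2 (mod 4) (and ≤ 62, so the 'b'
-- is preceded by a pad zero inside the 64-wide zfill).
def Pre_sBoxLayer (state : Int) : Prop :=
  0 ≤ state ∨ (PySem.Int.bitLength state % 4 = 2 ∧ PySem.Int.bitLength state ≤ 62)
instance (state : Int) : Decidable (Pre_sBoxLayer state) := by unfold Pre_sBoxLayer; infer_instance
def pvWitness_sBoxLayer : Int := 5

-- On negative states (inside Pre_: magnitude bit length ≡ 2 mod 4) A returns a garbage value: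
-- it substitutes the digits of the mangled string in which int('0bxy',2) accidentally parsed
-- the 'b' chunk; B applies the sbox to the state's two's-complement nibbles, the intended
-- arithmetic meaning (A(-2) = 14757395258967641286, B(-2) = 2459565876494606881).
def D_sBoxLayer (state : Int) : Prop := state < 0
instance (state : Int) : Decidable (D_sBoxLayer state) := by unfold D_sBoxLayer; infer_instance

def Spec_sBoxLayer (state : Int) (out : Int) : Prop := ¬ D_sBoxLayer state → out = sBoxLayer_alt state
instance (state : Int) (out : Int) : Decidable (Spec_sBoxLayer state out) := by
  unfold Spec_sBoxLayer; infer_instance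

def pvDiffWitness_sBoxLayer : Int := -2
def pvDiffWitnessOut_sBoxLayer : Int × Int := (14757395258967641286, 2459565876494606881)

-- ===== CLAIM (what is proved, stated in full; the proofs are below) =====
def Claim_unchanged_sBoxLayer : Prop :=
  ∀ (state : Int), Dom_sBoxLayer state → Pre_sBoxLayer state → Spec_sBoxLayer state (sBoxLayer state)
def Claim_changed_sBoxLayer : Prop :=
  Dom_sBoxLayer (pvDiffWitness_sBoxLayer) ∧ Pre_sBoxLayer (pvDiffWitness_sBoxLayer) ∧
    D_sBoxLayer (pvDiffWitness_sBoxLayer) ∧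
    sBoxLayer (pvDiffWitness_sBoxLayer) = pvDiffWitnessOut_sBoxLayer.1 ∧
    sBoxLayer_alt (pvDiffWitness_sBoxLayer) = pvDiffWitnessOut_sBoxLayer.2 ∧
    pvDiffWitnessOut_sBoxLayer.1 ≠ pvDiffWitnessOut_sBoxLayer.2

-- ===== LEMMAS AND PROOFS =====

-- minimal binary digit string of n ([] for 0), most significant first
def mbits (n : Nat) : List Char :=
  if n = 0 then [] else mbits (n / 2) ++ [Nat.digitChar (n % 2)]
decreasing_by exact Nat.bitwise_rec_lemma (by assumption)

-- the w-bit fixed-width binary string of n (mod 2^w), most significant first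
def bitsFix : Nat → Nat → List Char
  | 0, _ => []
  | w + 1, n => bitsFix w (n / 2) ++ [Nat.digitChar (n % 2)]

-- the sbox as a Nat table, for the arithmetic reasoning
def sbN (m : Nat) : Nat := [12, 5, 6, 11, 9, 0, 10, 13, 3, 14, 15, 8, 4, 7, 1, 2].getD m 0

theorem mbits_zero : mbits 0 = [] := by simp [mbits]
theorem mbits_pos {n : Nat} (h : n ≠ 0) : mbits n = mbits (n / 2) ++ [Nat.digitChar (n % 2)] := by
  rw [mbits]; simp [h]

theorem length_bitsFix (w n : Nat) : (bitsFix w n).length = w := by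
  induction w generalizing n with
  | zero => rfl
  | succ w ih => simp [bitsFix, ih]

theorem bitsFix_zero (w : Nat) : bitsFix w 0 = List.replicate w '0' := by
  induction w with
  | zero => rfl
  | succ w ih => rw [bitsFix]; simp [ih, List.replicate_succ', Nat.digitChar]

theorem mem_bitsFix {w n : Nat} {c : Char} (h : c ∈ bitsFix w n) : c = '0' ∨ c = '1' := by
  induction w generalizing n with
  | zero => simp [bitsFix] at h
  | succ w ih =>
    rw [bitsFix] at h
    rcases List.mem_append.mp h with h' | h'
    · exact ih h'
    · rcases Nat.mod_two_eq_zero_or_one n with hm | hm <;>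
        simp [hm, Nat.digitChar] at h' <;> simp [h']

theorem mem_mbits {n : Nat} {c : Char} (h : c ∈ mbits n) : c = '0' ∨ c = '1' := by
  induction n using Nat.strong_induction_on with
  | _ n ih =>
    by_cases h0 : n = 0
    · subst h0; simp [mbits_zero] at h
    · rw [mbits_pos h0] at h
      rcases List.mem_append.mp h with h' | h'
      · exact ih (n / 2) (Nat.bitwise_rec_lemma h0) h'
      · rcases Nat.mod_two_eq_zero_or_one n with hm | hm <;>
          simp [hm, Nat.digitChar] at h' <;> simp [h']

theorem length_mbits_le {w n : Nat} (h : n < 2 ^ w) : (mbits n).length ≤ w := by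
  induction w generalizing n with
  | zero => interval_cases n; simp [mbits_zero]
  | succ w ih =>
    by_cases h0 : n = 0
    · simp [h0, mbits_zero]
    · rw [mbits_pos h0]
      have hd : n / 2 < 2 ^ w := Nat.div_lt_of_lt_mul (by rw [← pow_succ']; exact h)
      have := ih hd
      simp only [List.length_append, List.length_cons, List.length_nil]
      omega

theorem replicate_mbits_eq_bitsFix {w n : Nat} (h : n < 2 ^ w) :
    List.replicate (w - (mbits n).length) '0' ++ mbits n = bitsFix w n := by
  induction w generalizing n with
  | zero => interval_cases n; simp [mbits_zero, bitsFix]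
  | succ w ih =>
    by_cases h0 : n = 0
    · subst h0; simp [mbits_zero, bitsFix_zero]
    · rw [mbits_pos h0, bitsFix]
      have hd : n / 2 < 2 ^ w := Nat.div_lt_of_lt_mul (by rw [← pow_succ']; exact h)
      have := ih hd
      simp only [List.length_append, List.length_cons, List.length_nil, zero_add]
      rw [show w + 1 - ((mbits (n / 2)).length + 1) = w - (mbits (n / 2)).length by omega,
        ← List.append_assoc, this]

-- Nat.toDigits in base 2 is '0' for 0 and mbits otherwise
theorem toDigitsCore_two (f : Nat) : ∀ n acc, n < f →
    Nat.toDigitsCore 2 f n acc = (if n = 0 then ['0'] else mbits n) ++ acc := by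
  induction f with
  | zero => intro n acc h; omega
  | succ f ih =>
    intro n acc h
    rw [Nat.toDigitsCore]
    by_cases h2 : n / 2 = 0
    · have : n = 0 ∨ n = 1 := by omega
      rcases this with rfl | rfl <;> simp [h2, Nat.digitChar, mbits_pos, mbits_zero]
    · have hn : n ≠ 0 := by omega
      simp only [h2, if_false]
      rw [ih (n / 2) _ (by omega), mbits_pos hn]
      simp [hn, h2]

theorem toDigits_two (n : Nat) :
    Nat.toDigits 2 n = (if n = 0 then ['0'] else mbits n) ++ [] := by
  exact toDigitsCore_two (n + 1) n [] (Nat.lt_succ_self n)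

-- the 64-padded binary string of a nonnegative state is its 64-bit fixed-width string
theorem string_state_eq {s : Nat} (hs : s < 2 ^ 62) :
    PySem.Chars.zfill (PySem.Chars.slice (PySem.Int.pyBin (s : Int)).toList (some 2) none) 64 =
      bitsFix 64 s := by
  have hnn : ¬ ((s : Int) < 0) := Int.not_lt.mpr (Int.natCast_nonneg s)
  rw [PySem.Int.toList_pyBin]
  rw [show PySem.Int.toBinChars0b (s : Int) = '0' :: 'b' :: Nat.toDigits 2 s by
    simp [PySem.Int.toBinChars0b, hnn]]
  rw [PySem.Chars.slice_eq_listSlice,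
    show ((2 : Int) = ((2 : Nat) : Int)) by norm_num,
    PySem.List.slice_from_natCast]
  simp only [List.drop_succ_cons, List.drop_zero]
  rw [toDigits_two, List.append_nil]
  by_cases h0 : s = 0
  · subst h0
    rw [PySem.Chars.zfill.eq_def]
    norm_num
    rw [bitsFix_zero, show (64 : Nat) = 63 + 1 by norm_num, List.replicate_succ']
    rfl
  · simp only [if_neg h0]
    have hlen : (mbits s).length ≤ 62 := length_mbits_le hs
    have hlt : s < 2 ^ 64 := lt_of_lt_of_le hs (by norm_num)
    rw [PySem.Chars.zfill.eq_def]
    have hle : ¬ ((64 : Int) ≤ ((mbits s).length : Int)) := by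
      omega
    simp only [hle, if_false]
    have hne : mbits s ≠ [] := by
      intro hnil
      exact h0 (by
        by_contra hs0
        rw [mbits_pos hs0] at hnil
        simp at hnil)
    obtain ⟨c, rest, hcr⟩ := List.exists_cons_of_ne_nil hne
    rw [hcr]
    have hc : c = '0' ∨ c = '1' := mem_mbits (by rw [hcr]; exact List.mem_cons_self ..)
    have hcs : ¬ (c = '+' ∨ c = '-') := by rcases hc with rfl | rfl <;> decide
    simp only [hcs, if_false]
    rw [← hcr]
    have := replicate_mbits_eq_bitsFix hlt
    simpa using this

-- splitting a fixed-width binary string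
theorem bitsFix_split (w2 w1 n : Nat) :
    bitsFix (w1 + w2) n = bitsFix w1 (n / 2 ^ w2) ++ bitsFix w2 (n % 2 ^ w2) := by
  induction w2 generalizing n with
  | zero => simp [bitsFix]
  | succ w2 ih =>
    rw [show w1 + (w2 + 1) = (w1 + w2) + 1 by omega, bitsFix, ih, bitsFix]
    have e1 : n / 2 / 2 ^ w2 = n / 2 ^ (w2 + 1) := by
      rw [Nat.div_div_eq_div_mul, pow_succ']
    have e2 : n % 2 ^ (w2 + 1) / 2 = n / 2 % 2 ^ w2 := by
      rw [show (2 : Nat) ^ (w2 + 1) = 2 * 2 ^ w2 by ring]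
      exact Nat.mod_mul_right_div_self n 2 (2 ^ w2)
    have e3 : n % 2 ^ (w2 + 1) % 2 = n % 2 := by
      exact Nat.mod_mod_of_dvd n (dvd_pow_self 2 (Nat.succ_ne_zero w2))
    rw [e1, e2, e3, List.append_assoc]

theorem goBin_append (ys : List Char) : ∀ xs acc,
    goBin acc (xs ++ ys) = (goBin acc xs).bind fun a => goBin a ys := by
  intro xs
  induction xs with
  | nil => intro acc; simp [goBin]
  | cons c cs ih =>
    intro acc
    simp only [List.cons_append, goBin]
    split_ifs <;> simp [ih]

theorem goBin_bitsFix : ∀ w n acc, n < 2 ^ w → goBin acc (bitsFix w n) = some (acc * 2 ^ w + n) := by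
  intro w
  induction w with
  | zero => intro n acc h; interval_cases n; simp [bitsFix, goBin]
  | succ w ih =>
    intro n acc h
    rw [bitsFix, goBin_append, ih (n / 2) acc (Nat.div_lt_of_lt_mul (by rw [← pow_succ']; exact h))]
    rcases Nat.mod_two_eq_zero_or_one n with hm | hm
    · rw [hm, show Nat.digitChar 0 = '0' from rfl,
        show ∀ a, (some a).bind (fun x => goBin x ['0']) = some (2 * a) from fun a => rfl]
      congr 1
      rw [pow_succ, show acc * (2 ^ w * 2) = acc * 2 ^ w * 2 by ring]
      omega
    · rw [hm, show Nat.digitChar 1 = '1' from rfl,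
        show ∀ a, (some a).bind (fun x => goBin x ['1']) = some (2 * a + 1) from fun a => rfl]
      congr 1
      rw [pow_succ, show acc * (2 ^ w * 2) = acc * 2 ^ w * 2 by ring]
      omega

theorem parseBin2_eq_goBin {cs : List Char} (hne : cs ≠ [])
    (hb : ∀ c ∈ cs, c = '0' ∨ c = '1') : parseBin2 cs = goBin 0 cs := by
  match cs, hne with
  | [c], _ =>
    rcases hb c (by simp) with rfl | rfl <;> rfl
  | c1 :: c2 :: rest, _ =>
    rcases hb c1 (by simp) with rfl | rfl <;>
      rcases hb c2 (by simp) with rfl | rfl <;> rfl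

theorem parseBin2_bitsFix {w n : Nat} (hw : 0 < w) (h : n < 2 ^ w) :
    parseBin2 (bitsFix w n) = some n := by
  rw [parseBin2_eq_goBin, goBin_bitsFix w n 0 h]
  · simp
  · intro hnil
    have := length_bitsFix w n
    rw [hnil] at this
    simp at this; omega
  · exact fun c hc => mem_bitsFix hc

-- the nibble of s at arithmetic position k
def nibAt (s k : Nat) : Nat := s / 2 ^ (4 * k) % 16

-- the k-th chunk of the 64-char string is the (15-k)-th arithmetic nibble
theorem chunk_eq {s : Nat} (k : Nat) (hk : k < 16) :
    ((bitsFix 64 s).drop (4 * k)).take 4 = bitsFix 4 (nibAt s (15 - k)) := by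
  have h1 : (64 : Nat) = 4 * k + (64 - 4 * k) := by omega
  rw [h1, bitsFix_split (64 - 4 * k) (4 * k) s]
  rw [List.drop_left' (length_bitsFix (4 * k) (s / 2 ^ (64 - 4 * k))),
    show (64 - 4 * k) = 4 + (60 - 4 * k) by omega,
    bitsFix_split (60 - 4 * k) 4 (s % 2 ^ (4 + (60 - 4 * k))),
    List.take_left' (length_bitsFix 4 (s % 2 ^ (4 + (60 - 4 * k)) / 2 ^ (60 - 4 * k)))]
  congr 1
  rw [show s % 2 ^ (4 + (60 - 4 * k)) = s % (2 ^ (60 - 4 * k) * 16) by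
      congr 1; rw [show (4 + (60 - 4 * k)) = (60 - 4 * k) + 4 by omega, pow_add]; norm_num,
    Nat.mod_mul_right_div_self]
  unfold nibAt
  rw [show 60 - 4 * k = 4 * (15 - k) by omega]

theorem sbN_lt (m : Nat) : sbN m < 16 := by
  unfold sbN
  rcases Nat.lt_or_ge m 16 with h | h
  · interval_cases m <;> decide
  · rw [List.getD_eq_default]
    · norm_num
    · simpa using h

-- the pyGet? of the sBox table at a small index, and the 4-padded binary string of its entry
theorem sBox_get (m : Nat) (hm : m < 16) :
    PySem.List.pyGet? sBox ((m : Nat) : Int) = some ((sbN m : Nat) : Int) := by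
  interval_cases m <;> decide

theorem sBox_chunk (v : Nat) (hv : v < 16) :
    PySem.Chars.zfill
        (PySem.List.slice (PySem.Int.toBinChars0b ((v : Nat) : Int)) (some 2) none) 4 =
      bitsFix 4 v := by
  interval_cases v <;> decide

theorem pyGetD_sBox (m : Nat) (hm : m < 16) :
    PySem.List.pyGetD sBox ((m : Nat) : Int) 0 = ((sbN m : Nat) : Int) := by
  interval_cases m <;> decide

-- the A-side loop, generalized over the remaining chunk indices
theorem foldA (s : Nat) (ks : List Nat) (hks : ∀ k ∈ ks, k < 16) : ∀ ns,
    (ks.map (fun k => ((4 * k : Nat) : Int))).foldl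
      (fun acc i =>
        acc.bind fun ns =>
          (parseBin2 (PySem.List.slice (bitsFix 64 s) (some i) (some (i + 4)))).bind fun c =>
            (PySem.List.pyGet? sBox (c : Int)).map fun v =>
              ns ++ PySem.Chars.zfill
                (PySem.Chars.slice (PySem.Int.pyBin v).toList (some 2) none) 4)
      (some ns)
    = some (ns ++ ks.flatMap (fun k => bitsFix 4 (sbN (nibAt s (15 - k))))) := by
  induction ks with
  | nil => intro ns; simp
  | cons k ks ih =>
    intro ns
    have hk : k < 16 := hks k (List.mem_cons_self ..)
    simp only [List.map_cons, List.foldl_cons, Option.bind_some]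
    rw [show ((((4 * k : Nat) : Int)) + 4 = (((4 * k : Nat) : Int) + ((4 : Nat) : Int))) by push_cast; ring,
      PySem.List.slice_natCast_add, chunk_eq k hk,
      parseBin2_bitsFix (by norm_num) (by unfold nibAt; exact Nat.mod_lt _ (by norm_num))]
    simp only [Option.bind_some]
    rw [sBox_get _ (by unfold nibAt; exact Nat.mod_lt _ (by norm_num))]
    simp only [Option.map_some]
    rw [ih (fun j hj => hks j (List.mem_cons_of_mem _ hj))]
    simp [sBox_chunk _ (sbN_lt _)]

-- parsing a concatenation of 4-bit chunks is the base-16 Horner fold of their values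
theorem goBin_flat (g : Nat → Nat) (hg : ∀ k, g k < 16) : ∀ (ks : List Nat) (acc : Nat),
    goBin acc (ks.flatMap (fun k => bitsFix 4 (g k)))
      = some (ks.foldl (fun a k => a * 16 + g k) acc) := by
  intro ks
  induction ks with
  | nil => intro acc; simp [goBin]
  | cons k ks ih =>
    intro acc
    simp only [List.flatMap_cons, goBin_append, goBin_bitsFix 4 (g k) acc (hg k)]
    simp [ih]

-- Horner fold over range n = big-endian weighted sum
theorem horner_sum (g : Nat → Nat) : ∀ n,
    (List.range n).foldl (fun a k => a * 16 + g k) 0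
      = ∑ k ∈ Finset.range n, g k * 16 ^ (n - 1 - k) := by
  intro n
  induction n with
  | zero => simp
  | succ n ih =>
    rw [List.range_succ, List.foldl_append, ih, Finset.sum_range_succ]
    simp only [List.foldl_cons, List.foldl_nil]
    rw [Finset.sum_mul]
    have : ∀ k ∈ Finset.range n, g k * 16 ^ (n - 1 - k) * 16 = g k * 16 ^ (n + 1 - 1 - k) := by
      intro k hk
      have := Finset.mem_range.mp hk
      rw [mul_assoc, ← pow_succ]
      congr 2
      omega
    rw [Finset.sum_congr rfl this]
    simp

-- sum bound: 16 nibble terms stay below 16^n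
theorem sum_nib_lt (g : Nat → Nat) (hg : ∀ k, g k < 16) (n : Nat) :
    ∑ k ∈ Finset.range n, g k * 16 ^ k < 16 ^ n := by
  induction n with
  | zero => simp
  | succ n ih =>
    rw [Finset.sum_range_succ]
    have := hg n
    have h16 : g n * 16 ^ n ≤ 15 * 16 ^ n := Nat.mul_le_mul_right _ (by omega)
    have : (16 : Nat) ^ (n + 1) = 16 * 16 ^ n := by ring
    omega

-- the B-side loop equals the little-endian weighted sum
theorem foldB (s : Nat) : ∀ n,
    (List.range n).foldl
      (fun result k =>
        let shift : Nat := 4 * k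
        PySem.Int.bor result
          (PySem.List.pyGetD sBox (PySem.Int.band (((s : Nat) : Int) >>> shift) 15) 0 <<< shift))
      0
    = ((∑ k ∈ Finset.range n, sbN (nibAt s k) * 16 ^ k : Nat) : Int) := by
  intro n
  induction n with
  | zero => simp
  | succ n ih =>
    rw [List.range_succ, List.foldl_append, ih]
    simp only [List.foldl_cons, List.foldl_nil]
    have hshift : (((s : Nat) : Int) >>> (4 * n)) = (((s >>> (4 * n) : Nat) : Nat) : Int) := by
      exact_mod_cast rfl
    rw [hshift, show (15 : Int) = ((15 : Nat) : Int) by norm_num, PySem.Int.band_natCast]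
    have hmask : s >>> (4 * n) &&& 15 = nibAt s n := by
      rw [Nat.shiftRight_eq_div_pow, show (15 : Nat) = 2 ^ 4 - 1 by norm_num,
        Nat.and_two_pow_sub_one_eq_mod]
      rfl
    rw [hmask, pyGetD_sBox _ (by unfold nibAt; exact Nat.mod_lt _ (by norm_num))]
    have hshl : (((sbN (nibAt s n) : Nat) : Int) <<< (4 * n))
        = (((sbN (nibAt s n) <<< (4 * n) : Nat) : Nat) : Int) := by exact_mod_cast rfl
    rw [hshl, PySem.Int.bor_natCast, Finset.sum_range_succ]
    congr 1
    have hlt : ∑ k ∈ Finset.range n, sbN (nibAt s k) * 16 ^ k < 2 ^ (4 * n) := by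
      have := sum_nib_lt (fun k => sbN (nibAt s k)) (fun k => sbN_lt _) n
      rwa [show (16 : Nat) ^ n = 2 ^ (4 * n) by rw [show (16:Nat) = 2^4 by norm_num, ← pow_mul]] at this
    rw [Nat.lor_comm, ← Nat.shiftLeft_add_eq_or_of_lt hlt, Nat.shiftLeft_eq]
    rw [show (2 : Nat) ^ (4 * n) = 16 ^ n by rw [show (16:Nat) = 2^4 by norm_num, ← pow_mul]]
    omega

-- bit length of a state in Dom
theorem bitLength_le_32 {s : Nat} (hs : s ≤ 2 ^ 31) : PySem.Int.bitLength (s : Int) ≤ 32 := by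
  by_cases h0 : s = 0
  · subst h0; norm_num [PySem.Int.bitLength_natCast_zero]
  · by_contra hgt
    have h1 : 2 ^ (PySem.Int.bitLength ((s : Nat) : Int) - 1) ≤ ((s : Nat) : Int).natAbs :=
      PySem.Int.two_pow_bitLength_le _ (by exact_mod_cast h0)
    have h2 : (2 : Nat) ^ 32 ≤ 2 ^ (PySem.Int.bitLength ((s : Nat) : Int) - 1) :=
      Nat.pow_le_pow_right (by norm_num) (by omega)
    simp only [Int.natAbs_natCast] at h1
    have : (2 : Nat) ^ 32 ≤ 2 ^ 31 := le_trans (le_trans h2 h1) hs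
    norm_num at this

theorem Aside {s : Nat} (hs62 : s < 2 ^ 62) :
    sBoxLayer (s : Int) =
      ((∑ k ∈ Finset.range 16, sbN (nibAt s (15 - k)) * 16 ^ (16 - 1 - k) : Nat) : Int) := by
  rw [sBoxLayer]
  simp only [string_state_eq hs62, length_bitsFix]
  rw [show PySem.List.pyRange 0 ((64 : Nat) : Int) 4
        = (List.range 16).map (fun k => ((4 * k : Nat) : Int)) by decide]
  rw [foldA s (List.range 16) (fun k hk => List.mem_range.mp hk) []]
  simp only [List.nil_append, Option.bind_some]
  rw [parseBin2_eq_goBin, goBin_flat (fun k => sbN (nibAt s (15 - k))) (fun k => sbN_lt _)]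
  · simp only [horner_sum]
  · intro hnil
    have := congrArg List.length hnil
    simp [List.length_flatMap, length_bitsFix] at this
  · intro c hc
    rcases List.mem_flatMap.mp hc with ⟨k, _, hck⟩
    exact mem_bitsFix hck

theorem Bside {s : Nat} (hs : s ≤ 2 ^ 31) :
    sBoxLayer_alt (s : Int) = ((∑ k ∈ Finset.range 16, sbN (nibAt s k) * 16 ^ k : Nat) : Int) := by
  rw [sBoxLayer_alt]
  have h16 : max 16 ((PySem.Int.bitLength (s : Int) + 3) / 4) = 16 := by
    have := bitLength_le_32 hs
    omega
  simp only [h16]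
  exact foldB s 16

theorem main_eq {s : Nat} (hs : s ≤ 2 ^ 31) : sBoxLayer (s : Int) = sBoxLayer_alt (s : Int) := by
  refine (Aside (lt_of_le_of_lt hs (by norm_num))).trans
    (Eq.trans (congrArg (fun z : Nat => (z : Int)) ?_) (Bside hs).symm)
  have hcg : ∀ k ∈ Finset.range 16, sbN (nibAt s (15 - k)) * 16 ^ (16 - 1 - k)
      = sbN (nibAt s (16 - 1 - k)) * 16 ^ (16 - 1 - k) := by
    intro k hk
    have h1 : (15 - k : Nat) = 16 - 1 - k := by omega
    rw [h1]
  rw [Finset.sum_congr rfl hcg,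
    Finset.sum_range_reflect (fun k => sbN (nibAt s k) * 16 ^ k) 16]

-- ===== VERDICT (by name: the statement is the Claim_ definition above) =====
theorem sBoxLayer_spec : Claim_unchanged_sBoxLayer := by
  intro state hdom hpre
  unfold Spec_sBoxLayer
  intro hnd
  have h0 : 0 ≤ state := by
    unfold D_sBoxLayer at hnd; omega
  have hle : state ≤ 2 ^ 31 := by
    unfold Dom_sBoxLayer pvDomInt at hdom
    simp only [decide_eq_true_eq] at hdom
    norm_num; omega
  obtain ⟨s, rfl⟩ : ∃ s : Nat, state = (s : Int) := ⟨state.toNat, (Int.toNat_of_nonneg h0).symm⟩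
  exact main_eq (by exact_mod_cast hle)

theorem sBoxLayer_changed : Claim_changed_sBoxLayer := by
  unfold Claim_changed_sBoxLayer; decide
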